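-- pv_equiv track=rewrite | github.com/viktorkislyak1996/Get-matrix | matrix/utils.py | traverse_matrix
-- ===== SOURCE A (Python) =====
-- def traverse_matrix(matrix: list[list[int]]) -> list[int]:
--     """
--     Return a new list containing the result of traversing the matrix
--     in a spiral: counterclockwise, starting from the upper left corner.
--
--     Args:
--         matrix (list[list[int]]): The original matrix
--
--     Returns:
--         (list[int]): The traversed matrix
--     """
--     end_row_idx = end_col_idx = len(matrix)
--     start_row_idx = start_col_idx = 0
--     result = []
--     while start_row_idx < end_row_idx and start_col_idx < end_col_idx:
--         # Traverse the first column from the remaining columns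
--         for i in range(start_row_idx, end_row_idx):
--             result.append(matrix[i][start_col_idx])
--         start_col_idx += 1
--
--         # Traverse the last row from the remaining columns
--         for j in range(start_col_idx, end_col_idx):
--             result.append(matrix[end_row_idx - 1][j])
--         end_row_idx -= 1
--
--         # Traverse the last column from the remaining columns
--         for i in range(end_row_idx - 1, start_row_idx - 1, -1):
--             result.append(matrix[i][end_col_idx - 1])
--         end_col_idx -= 1
--
--         # Traverse the first row from the remaining columns
--         for j in range(end_col_idx - 1, start_col_idx - 1, -1):
--             result.append(matrix[start_row_idx][j])
--         start_row_idx += 1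
--     return result
-- ===== SOURCE B (Python) =====
-- def traverse_matrix(matrix: list[list[int]]) -> list[int]:
--     """Counterclockwise spiral of the len(matrix) x len(matrix) block: emit the
--     first column, then rotate the remainder 90 degrees clockwise and repeat."""
--     n = len(matrix)
--     m = [row[:n] for row in matrix]
--     result = []
--     while m and m[0]:
--         result += [row[0] for row in m]
--         rows = len(m)
--         m = [[m[rows - 1 - j][i + 1] for j in range(rows)]
--              for i in range(len(m[0]) - 1)]
--     return result
-- ===== Notes on version B (the rewrite author's own statement) =====
-- stated objective: alternative
-- what changed: Replaces the four-boundary index bookkeeping (start/end row/column counters with four range loops per ring) by a peel-and-rotate loop over the len(matrix)-column block A's spiral visits: emit the first column, then rotate the remainder 90 degrees clockwise and repeat; it trades speed for a uniform per-pass step (the rotation copies the remainder each pass).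
import Mathlib
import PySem

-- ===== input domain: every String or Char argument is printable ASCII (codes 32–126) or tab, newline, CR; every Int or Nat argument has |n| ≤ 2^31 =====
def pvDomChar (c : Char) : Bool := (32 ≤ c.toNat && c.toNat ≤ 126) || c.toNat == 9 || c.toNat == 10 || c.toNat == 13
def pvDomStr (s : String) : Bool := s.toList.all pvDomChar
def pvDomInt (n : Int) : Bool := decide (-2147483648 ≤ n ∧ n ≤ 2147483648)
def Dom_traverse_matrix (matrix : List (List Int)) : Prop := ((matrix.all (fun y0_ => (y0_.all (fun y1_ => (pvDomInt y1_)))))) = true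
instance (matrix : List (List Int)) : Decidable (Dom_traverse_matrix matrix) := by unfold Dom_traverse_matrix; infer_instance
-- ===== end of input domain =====

-- B replaces A's four-boundary index bookkeeping by a peel-first-column-then-rotate-clockwise loop over the len(matrix)-column block A's spiral visits (alternative decomposition; the per-pass rotation copy makes B slower on large matrices).


-- ===== PORT A =====
-- matrix[i][j]; exact wherever Python does not raise (Pre_ keeps all reads in range)
def tmGet (matrix : List (List Int)) (i j : Int) : Int :=
  PySem.List.pyGetD (PySem.List.pyGetD matrix i []) j 0

-- the while loop of A, state (start_row, start_col, end_row, end_col, result);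
-- the fuel argument is only a structural totality guard (er-sr shrinks by 2 per pass,
-- so fuel = len(matrix) is never exhausted) — it adds nothing to the computation
def tmLoop (matrix : List (List Int)) (fuel : Nat) (sr sc er ec : Int) (res : List Int) : List Int :=
  match fuel with
  | 0 => res
  | fuel + 1 =>
    if sr < er ∧ sc < ec then
      let r1 := res ++ (PySem.List.pyRange sr er 1).map (fun i => tmGet matrix i sc)
      let sc1 := sc + 1
      let r2 := r1 ++ (PySem.List.pyRange sc1 ec 1).map (fun j => tmGet matrix (er - 1) j)
      let er1 := er - 1
      let r3 := r2 ++ (PySem.List.pyRange (er1 - 1) (sr - 1) (-1)).map (fun i => tmGet matrix i (ec - 1))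
      let ec1 := ec - 1
      let r4 := r3 ++ (PySem.List.pyRange (ec1 - 1) (sc1 - 1) (-1)).map (fun j => tmGet matrix sr j)
      tmLoop matrix fuel (sr + 1) sc1 er1 ec1 r4
    else res

def traverse_matrix (matrix : List (List Int)) : List Int :=
  tmLoop matrix matrix.length 0 0 (matrix.length : Int) (matrix.length : Int) []

-- ===== PORT B =====
-- entry m[i][j] with nonnegative indices, totalised (Pre_ keeps every read B makes in range)
def ent (m : List (List Int)) (i j : Nat) : Int := (m.getD i []).getD j 0

-- Source B's rotation comprehension: [[m[rows-1-j][i+1] for j in range(rows)] for i in range(len(m[0])-1)]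
def rotateCW (m : List (List Int)) : List (List Int) :=
  (List.range ((m.headD []).length - 1)).map (fun i =>
    (List.range m.length).map (fun j => ent m (m.length - 1 - j) (i + 1)))

def sumLen (m : List (List Int)) : Nat := (m.map List.length).sum

-- the while loop of B: emit the first column, rotate the remainder clockwise;
-- fuel is a structural totality guard only (the total number of entries shrinks each pass)
def tmAltLoop (fuel : Nat) (m : List (List Int)) : List Int :=
  match fuel with
  | 0 => []
  | fuel + 1 =>
    if m ≠ [] ∧ m.headD [] ≠ [] then
      (m.map (fun r => r.headD 0)) ++ tmAltLoop fuel (rotateCW m)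
    else []

def traverse_matrix_alt (matrix : List (List Int)) : List Int :=
  let m := matrix.map (fun row => PySem.List.slice row none (some (matrix.length : Int)))
  tmAltLoop (sumLen m + 1) m

-- ===== PRECONDITION & SPEC =====
-- Pre_ excludes exactly the inputs on which A raises IndexError (some row shorter than
-- len(matrix)); A returns normally on every input admitted here.
def Pre_traverse_matrix (matrix : List (List Int)) : Prop :=
  ∀ row ∈ matrix, matrix.length ≤ row.length
instance (matrix : List (List Int)) : Decidable (Pre_traverse_matrix matrix) := by
  unfold Pre_traverse_matrix; infer_instance

def pvWitness_traverse_matrix : List (List Int) := [[1, 2], [3, 4]]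

def Spec_traverse_matrix (matrix : List (List Int)) (out : List Int) : Prop := out = traverse_matrix_alt matrix
instance (matrix : List (List Int)) (out : List Int) : Decidable (Spec_traverse_matrix matrix out) := by unfold Spec_traverse_matrix; infer_instance

-- ===== CLAIM (what is proved, stated in full; the proofs are below) =====
def Claim_equal_traverse_matrix : Prop := ∀ (matrix : List (List Int)), Dom_traverse_matrix matrix → Pre_traverse_matrix matrix → Spec_traverse_matrix matrix (traverse_matrix matrix)

-- ===== LEMMAS AND PROOFS =====

-- abstract counterclockwise spiral of an r×c matrix of entries f
def specB (r c : Nat) (f : Nat → Nat → Int) : List Int :=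
  if r = 0 ∨ c = 0 then []
  else ((List.range r).map (fun i => f i 0)) ++ specB (c - 1) r (fun i j => f (r - 1 - j) (i + 1))
termination_by r + c
decreasing_by omega

def Rect (r c : Nat) (m : List (List Int)) : Prop :=
  m.length = r ∧ ∀ row ∈ m, row.length = c

theorem specB_congr_aux : ∀ (n r c : Nat), r + c ≤ n → ∀ f g : Nat → Nat → Int,
    (∀ i j, i < r → j < c → f i j = g i j) → specB r c f = specB r c g := by
  intro n
  induction n with
  | zero =>
    intro r c h f g _
    have hr : r = 0 := by omega
    unfold specB
    simp [hr]
  | succ n ih =>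
    intro r c h f g hfg
    unfold specB
    by_cases h0 : r = 0 ∨ c = 0
    · rw [if_pos h0, if_pos h0]
    · rw [if_neg (by omega : ¬(r = 0 ∨ c = 0)), if_neg (by omega : ¬(r = 0 ∨ c = 0))]
      congr 1
      · exact List.map_congr_left (fun i hi => hfg i 0 (List.mem_range.mp hi) (by omega))
      · exact ih (c - 1) r (by omega) _ _ (fun i j hi hj => hfg (r - 1 - j) (i + 1) (by omega) (by omega))

theorem specB_congr (r c : Nat) (f g : Nat → Nat → Int)
    (h : ∀ i j, i < r → j < c → f i j = g i j) : specB r c f = specB r c g :=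
  specB_congr_aux (r + c) r c le_rfl f g h

theorem sumLen_rect : ∀ (m : List (List Int)) (r c : Nat), Rect r c m → sumLen m = r * c := by
  intro m
  induction m with
  | nil => intro r c ⟨h1, _⟩; simp at h1; simp [sumLen, ← h1]
  | cons r0 rest ih =>
    intro r c ⟨h1, h2⟩
    have := ih rest.length c ⟨rfl, fun row hrow => h2 row (by simp [hrow])⟩
    have hr : r = rest.length + 1 := by simp at h1; omega
    simp [sumLen] at this ⊢
    rw [this, h2 r0 (by simp), hr]
    ring

theorem head_len (r c : Nat) (m : List (List Int)) (hm : Rect r c m) (hr : 1 ≤ r) :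
    (m.headD []).length = c := by
  obtain ⟨h1, h2⟩ := hm
  cases m with
  | nil => simp at h1; omega
  | cons a l => exact h2 a (by simp)

theorem rotate_rect (r c : Nat) (m : List (List Int)) (hm : Rect r c m) (hr : 1 ≤ r) :
    Rect (c - 1) r (rotateCW m) := by
  have hc := head_len r c m hm hr
  constructor
  · simp only [rotateCW, List.length_map, List.length_range, hc]
  · intro row hrow
    simp only [rotateCW, List.mem_map] at hrow
    obtain ⟨i, _, hrt⟩ := hrow
    subst hrt
    simp [hm.1]

theorem rotate_ent (r c : Nat) (m : List (List Int)) (hm : Rect r c m) (hr : 1 ≤ r)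
    (i j : Nat) (hi : i < c - 1) (hj : j < r) :
    ent (rotateCW m) i j = ent m (r - 1 - j) (i + 1) := by
  have hc := head_len r c m hm hr
  have h1 := hm.1
  simp only [ent, rotateCW, List.getD]
  rw [List.getElem?_map]
  rw [List.getElem?_eq_getElem (by rw [List.length_range, hc]; omega : i < (List.range ((m.headD []).length - 1)).length)]
  simp only [Option.map_some, Option.getD_some, List.getElem_range]
  rw [List.getElem?_map]
  rw [List.getElem?_eq_getElem (by rw [List.length_range]; omega : j < (List.range m.length).length)]
  simp only [Option.map_some, Option.getD_some, List.getElem_range, h1]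

theorem getD_zero_headD (l : List Int) : l.getD 0 0 = l.headD 0 := by
  cases l <;> simp [List.getD]

theorem tmAltLoop_spec : ∀ (fuel r c : Nat) (m : List (List Int)), Rect r c m →
    sumLen m < fuel → tmAltLoop fuel m = specB r c (ent m) := by
  intro fuel
  induction fuel with
  | zero => intro r c m _ h; omega
  | succ fuel ih =>
    intro r c m hm hfuel
    obtain ⟨h1, h2⟩ := hm
    by_cases hguard : m ≠ [] ∧ m.headD [] ≠ []
    · have hr : 1 ≤ r := by
        cases m with
        | nil => exact absurd rfl hguard.1
        | cons a l => simp at h1; omega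
      have hc : 1 ≤ c := by
        have := head_len r c m ⟨h1, h2⟩ hr
        cases hx : m.headD [] with
        | nil => exact absurd hx hguard.2
        | cons y ys => rw [hx] at this; simp at this; omega
      rw [tmAltLoop, if_pos hguard]
      have hrect' := rotate_rect r c m ⟨h1, h2⟩ hr
      have hsum : sumLen m = r * c := sumLen_rect m r c ⟨h1, h2⟩
      have hsum' : sumLen (rotateCW m) = (c - 1) * r := sumLen_rect _ _ _ hrect'
      have hlt : sumLen (rotateCW m) < fuel := by
        have h3 : (c - 1) * r + r = r * c := by
          cases c with
          | zero => omega
          | succ c' => simp; ring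
        omega
      rw [ih (c - 1) r _ hrect' hlt]
      conv_rhs => rw [specB]
      rw [if_neg (by omega : ¬(r = 0 ∨ c = 0))]
      congr 1
      · apply List.ext_getElem
        · simp [h1]
        · intro i hi1 hi2
          simp only [List.getElem_map, List.getElem_range]
          have him : i < m.length := by simpa using hi1
          simp only [ent, List.getD, List.getElem?_eq_getElem him, Option.getD_some]
          exact (getD_zero_headD (m[i])).symm
      · apply specB_congr
        intro i j hi hj
        exact rotate_ent r c m ⟨h1, h2⟩ hr i j hi hj
    · rw [tmAltLoop, if_neg hguard]
      have h0 : r = 0 ∨ c = 0 := by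
        by_cases hm0 : m = []
        · left; subst hm0; simpa using h1.symm
        · right
          have hr : 1 ≤ r := by
            cases m with
            | nil => exact absurd rfl hm0
            | cons a l => simp at h1; omega
          have := head_len r c m ⟨h1, h2⟩ hr
          have hhead : m.headD [] = [] := by
            by_contra hne
            exact hguard ⟨hm0, hne⟩
          rw [hhead] at this
          simpa using this.symm
      rw [specB, if_pos h0]

theorem specB_zero_left (c : Nat) (f : Nat → Nat → Int) : specB 0 c f = [] := by
  rw [specB]; simp

theorem tmGet_nat (M : List (List Int)) (i j : Nat) : tmGet M (i : Int) (j : Int) = ent M i j := by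
  simp [tmGet, ent, PySem.List.pyGetD_natCast]

-- one pass of A's ring = four peel steps of the abstract spiral
theorem fourStep (s : Nat) (hs : 1 ≤ s) (f : Nat → Nat → Int) :
    specB s s f
      = ((List.range s).map (fun i => f i 0))
        ++ ((List.range (s - 1)).map (fun i => f (s - 1) (i + 1)))
        ++ ((List.range (s - 1)).map (fun i => f (s - 2 - i) (s - 1)))
        ++ ((List.range (s - 2)).map (fun i => f 0 (s - 2 - i)))
        ++ specB (s - 2) (s - 2) (fun i j => f (i + 1) (j + 1)) := by
  rcases Nat.lt_or_ge s 2 with h2 | h2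
  · interval_cases s
    rw [specB]
    simp [specB_zero_left]
  · conv_lhs => rw [specB]
    rw [if_neg (by omega : ¬(s = 0 ∨ s = 0))]
    conv_lhs => rw [specB]
    rw [if_neg (by omega : ¬(s - 1 = 0 ∨ s = 0))]
    conv_lhs => rw [specB]
    rw [if_neg (by omega : ¬(s - 1 = 0 ∨ s - 1 = 0))]
    simp only [List.append_assoc]
    congr 1
    congr 1
    congr 1
    · apply List.map_congr_left
      intro i hi
      rw [List.mem_range] at hi
      congr 1 <;> omega
    rcases Nat.lt_or_ge s 3 with h3 | h3
    · interval_cases s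
      rw [specB]
      simp [specB_zero_left]
    · conv_lhs => rw [specB]
      rw [if_neg (by omega : ¬(s - 1 - 1 = 0 ∨ s - 1 = 0))]
      congr 1
      · apply List.map_congr_left
        intro i hi
        rw [List.mem_range] at hi
        congr 1 <;> omega
      · rw [show s - 1 - 1 - 1 = s - 2 - 1 by omega]
        apply specB_congr
        intro i j hi hj
        congr 1 <;> omega

theorem tmLoop_spec (M : List (List Int)) :
    ∀ (fuel k s : Nat) (acc : List Int), s ≤ 2 * fuel →
    tmLoop M fuel (k : Int) (k : Int) ((k : Int) + (s : Int)) ((k : Int) + (s : Int)) acc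
      = acc ++ specB s s (fun i j => ent M (i + k) (j + k)) := by
  intro fuel
  induction fuel with
  | zero =>
    intro k s acc hs
    have : s = 0 := by omega
    subst this
    simp [tmLoop, specB_zero_left]
  | succ fuel ih =>
    intro k s acc hs
    rcases Nat.eq_zero_or_pos s with h0 | h0
    · subst h0
      rw [tmLoop]
      rw [if_neg (by omega)]
      simp [specB_zero_left]
    · rw [tmLoop]
      rw [if_pos (by constructor <;> omega)]
      simp only []
      have e1 : (PySem.List.pyRange (k : Int) ((k : Int) + (s : Int)) 1).map (fun i => tmGet M i (k : Int))
          = (List.range s).map (fun i => ent M (i + k) (0 + k)) := by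
        rw [PySem.List.pyRange_one, show (((k : Int) + (s : Int)) - (k : Int)).toNat = s by omega,
          List.map_map]
        apply List.map_congr_left
        intro t ht
        simp only [Function.comp]
        rw [show ((k : Int) + (t : Int)) = ((t + k : Nat) : Int) by push_cast; ring, tmGet_nat]
        congr 1
        omega
      have e2 : (PySem.List.pyRange ((k : Int) + 1) ((k : Int) + (s : Int)) 1).map
            (fun j => tmGet M ((k : Int) + (s : Int) - 1) j)
          = (List.range (s - 1)).map (fun i => ent M (s - 1 + k) (i + 1 + k)) := by
        rw [PySem.List.pyRange_one, show (((k : Int) + (s : Int)) - ((k : Int) + 1)).toNat = s - 1 by omega,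
          List.map_map]
        apply List.map_congr_left
        intro t ht
        rw [List.mem_range] at ht
        simp only [Function.comp]
        rw [show ((k : Int) + (s : Int) - 1) = ((s - 1 + k : Nat) : Int) by push_cast [Nat.cast_sub (by omega : 1 ≤ s)]; ring,
          show ((k : Int) + 1 + (t : Int)) = ((t + 1 + k : Nat) : Int) by push_cast; ring, tmGet_nat]
      have e3 : (PySem.List.pyRange ((k : Int) + (s : Int) - 1 - 1) ((k : Int) - 1) (-1)).map
            (fun i => tmGet M i ((k : Int) + (s : Int) - 1))
          = (List.range (s - 1)).map (fun i => ent M (s - 2 - i + k) (s - 1 + k)) := by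
        rw [PySem.List.pyRange_neg_one,
          show (((k : Int) + (s : Int) - 1 - 1) - ((k : Int) - 1)).toNat = s - 1 by omega,
          List.map_map]
        apply List.map_congr_left
        intro t ht
        rw [List.mem_range] at ht
        simp only [Function.comp]
        rw [show ((k : Int) + (s : Int) - 1 - 1 - (t : Int)) = ((s - 2 - t + k : Nat) : Int) by
              push_cast [Nat.cast_sub (by omega : t ≤ s - 2), Nat.cast_sub (by omega : 2 ≤ s)]; ring,
          show ((k : Int) + (s : Int) - 1) = ((s - 1 + k : Nat) : Int) by
              push_cast [Nat.cast_sub (by omega : 1 ≤ s)]; ring, tmGet_nat]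
      have e4 : (PySem.List.pyRange ((k : Int) + (s : Int) - 1 - 1) ((k : Int) + 1 - 1) (-1)).map
            (fun j => tmGet M (k : Int) j)
          = (List.range (s - 2)).map (fun i => ent M (0 + k) (s - 2 - i + k)) := by
        rw [PySem.List.pyRange_neg_one,
          show (((k : Int) + (s : Int) - 1 - 1) - ((k : Int) + 1 - 1)).toNat = s - 2 by omega,
          List.map_map]
        apply List.map_congr_left
        intro t ht
        rw [List.mem_range] at ht
        simp only [Function.comp]
        rw [show ((k : Int) + (s : Int) - 1 - 1 - (t : Int)) = ((s - 2 - t + k : Nat) : Int) by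
              push_cast [Nat.cast_sub (by omega : t ≤ s - 2), Nat.cast_sub (by omega : 2 ≤ s)]; ring,
          show ((k : Int)) = ((0 + k : Nat) : Int) by push_cast; ring, tmGet_nat]
      rw [e1, e2, e3, e4]
      rcases Nat.lt_or_ge s 2 with hs1 | hs2
      · have hs1' : s = 1 := by omega
        subst hs1'
        have hrest : ∀ g : Nat, tmLoop M g ((k : Int) + 1) ((k : Int) + 1)
            ((k : Int) + (1 : Nat) - 1) ((k : Int) + (1 : Nat) - 1) (acc ++
              (List.range 1).map (fun i => ent M (i + k) (0 + k)) ++ [] ++ [] ++ [])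
            = acc ++ (List.range 1).map (fun i => ent M (i + k) (0 + k)) ++ [] ++ [] ++ [] := by
          intro g
          cases g with
          | zero => rw [tmLoop]
          | succ g => rw [tmLoop]; rw [if_neg (by push_cast; omega)]
        simp only [show ((1 : Nat) : Int) = 1 by norm_num] at hrest ⊢
        simp only [show ((1:Nat) - 2) = 0 by norm_num, List.range_one, List.map_cons, List.map_nil,
          List.range_zero, List.append_nil] at hrest ⊢
        rw [hrest]
        rw [specB, if_neg (by omega), specB_zero_left]
        simp
      · rw [show ((k : Int) + 1) = (((k + 1 : Nat)) : Int) by push_cast; ring,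
          show ((k : Int) + (s : Nat) - 1) = (((k + 1 : Nat)) : Int) + (((s - 2 : Nat)) : Int) by
            push_cast [Nat.cast_sub (by omega : 2 ≤ s)]; ring]
        rw [ih (k + 1) (s - 2) _ (by omega)]
        rw [fourStep s (by omega)]
        simp only [List.append_assoc]
        congr 5
        apply specB_congr
        intro i j hi hj
        congr 1 <;> omega

theorem getD_take (l : List Int) (n j : Nat) (h : j < n) : (l.take n).getD j 0 = l.getD j 0 := by
  simp [List.getD, h]

theorem traverse_matrix_alt_spec (M : List (List Int)) (hM : Pre_traverse_matrix M) :
    traverse_matrix_alt M = specB M.length M.length (ent M) := by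
  unfold traverse_matrix_alt
  have hsl : ∀ row : List Int, PySem.List.slice row none (some (M.length : Int)) = row.take M.length := by
    intro row
    rw [PySem.List.slice_to row (by omega)]
    simp
  simp only [hsl]
  have hrect : Rect M.length M.length (M.map (fun row => row.take M.length)) := by
    refine ⟨by simp, fun row hrow => ?_⟩
    simp only [List.mem_map] at hrow
    obtain ⟨r, hr, hrt⟩ := hrow
    subst hrt
    have := hM r hr
    simp
    omega
  rw [tmAltLoop_spec _ M.length M.length _ hrect (by omega)]
  apply specB_congr
  intro i j hi hj
  have hiM : i < M.length := hi
  simp only [ent, List.getD, List.getElem?_map, List.getElem?_eq_getElem hiM, Option.map_some,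
    Option.getD_some]
  have := getD_take (M[i]) M.length j hj
  simp only [List.getD] at this
  rw [this]

-- ===== VERDICT (by name: the statement is the Claim_ definition above) =====
theorem traverse_matrix_spec : Claim_equal_traverse_matrix := by
  intro M _ hpre
  unfold Spec_traverse_matrix
  rw [traverse_matrix_alt_spec M hpre]
  unfold traverse_matrix
  rw [show ((M.length : Nat) : Int) = ((0 : Nat) : Int) + ((M.length : Nat) : Int) by simp,
    show ((0 : Int)) = (((0 : Nat)) : Int) by simp]
  rw [tmLoop_spec M M.length 0 M.length [] (by omega)]
  simp only [List.nil_append]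
  apply specB_congr
  intro i j _ _
  simp [ent]
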